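-- pv_equiv track=rewrite | github.com/hyeonbin123/CordingTest | baekjoon/1296.py | find_best_team_name
-- ===== SOURCE A (Python) =====
-- def calculate_probability(name, team_name):
--     combined = name + team_name
--     L = combined.count('L')
--     O = combined.count('O')
--     V = combined.count('V')
--     E = combined.count('E')
--
--     return ((L+O) * (L+V) * (L+E) * (O+V) * (O+E) * (V+E)) % 100
--
-- def find_best_team_name(name, team_names):
--     best_prob = -1
--     best_team = ''
--
--     for team in team_names:
--         prob = calculate_probability(name, team)
--         if prob > best_prob or (prob == best_prob and team < best_team):
--             best_prob = prob
--             best_team = team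
--
--     return best_team
-- ===== SOURCE B (Python) =====
-- def calculate_probability(name, team_name):
--     combined = name + team_name
--     L = combined.count('L')
--     O = combined.count('O')
--     V = combined.count('V')
--     E = combined.count('E')
--
--     return ((L+O) * (L+V) * (L+E) * (O+V) * (O+E) * (V+E)) % 100
--
--
-- def find_best_team_name(name, team_names):
--     # Two-pass decomposition: score everything once, take the max score,
--     # then return the lexicographically smallest team achieving it.
--     if not team_names:
--         return ''
--     scored = [(calculate_probability(name, t), t) for t in team_names]
--     best_prob = max(p for p, _ in scored)
--     return min(t for p, t in scored if p == best_prob)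
-- ===== Notes on version B (the rewrite author's own statement) =====
-- stated objective: alternative
-- what changed: Replaces the single fold that maintains (best_prob, best_team) with a combined greater-or-lex-tie update by a two-pass max/min decomposition: score all teams, take the maximum score, then return the lexicographic minimum among the teams attaining it.
import Mathlib
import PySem

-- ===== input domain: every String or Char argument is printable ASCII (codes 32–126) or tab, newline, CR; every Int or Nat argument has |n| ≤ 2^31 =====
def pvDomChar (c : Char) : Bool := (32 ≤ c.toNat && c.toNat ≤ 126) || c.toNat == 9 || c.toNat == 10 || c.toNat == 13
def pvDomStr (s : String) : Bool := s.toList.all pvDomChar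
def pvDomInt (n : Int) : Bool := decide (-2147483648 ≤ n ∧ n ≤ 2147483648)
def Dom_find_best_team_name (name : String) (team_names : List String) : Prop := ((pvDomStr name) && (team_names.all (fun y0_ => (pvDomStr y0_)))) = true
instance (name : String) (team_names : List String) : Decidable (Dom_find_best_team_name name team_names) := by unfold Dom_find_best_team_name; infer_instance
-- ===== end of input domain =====

-- B differs from A by a two-pass max-then-lexicographic-min decomposition; return values proved equal.

-- ===== PORT A =====
-- shared helper: identical in Source A and Source B
def calculate_probability (name team_name : String) : Int :=
  let combined := name ++ team_name
  let L : Int := (PySem.Str.count combined "L" : Int)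
  let O : Int := (PySem.Str.count combined "O" : Int)
  let V : Int := (PySem.Str.count combined "V" : Int)
  let E : Int := (PySem.Str.count combined "E" : Int)
  PySem.Int.mod ((L+O) * (L+V) * (L+E) * (O+V) * (O+E) * (V+E)) 100

def find_best_team_name (name : String) (team_names : List String) : String :=
  (team_names.foldl
    (fun best team =>
      let prob := calculate_probability name team
      if prob > best.1 ∨ (prob = best.1 ∧ team < best.2) then (prob, team) else best)
    ((-1 : Int), "")).2

-- ===== PORT B =====
def find_best_team_name_alt (name : String) (team_names : List String) : String :=
  match team_names with
  | [] => ""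
  | _ :: _ =>
    let scored := team_names.map (fun t => (calculate_probability name t, t))
    let best_prob := (PySem.List.max? (scored.map Prod.fst) (fun p => p)).getD 0
    (PySem.List.min? ((scored.filter (fun pt => pt.1 == best_prob)).map Prod.snd) (fun t => t)).getD ""

-- ===== PRECONDITION & SPEC =====
def Spec_find_best_team_name (name : String) (team_names : List String) (out : String) : Prop := out = find_best_team_name_alt name team_names
instance (name : String) (team_names : List String) (out : String) : Decidable (Spec_find_best_team_name name team_names out) := by unfold Spec_find_best_team_name; infer_instance

-- ===== CLAIM (what is proved, stated in full; the proofs are below) =====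
def Claim_equal_find_best_team_name : Prop := ∀ (name : String) (team_names : List String), Dom_find_best_team_name name team_names → Spec_find_best_team_name name team_names (find_best_team_name name team_names)

-- ===== LEMMAS AND PROOFS =====

-- "b is at least as good as a" in A's combined ordering (higher prob, tie: smaller string)
def pvLe (a b : Int × String) : Prop := a.1 < b.1 ∨ (a.1 = b.1 ∧ b.2 ≤ a.2)

theorem pvLe_refl (a : Int × String) : pvLe a a := Or.inr ⟨rfl, le_refl _⟩

theorem pvLe_trans {a b c : Int × String} (h1 : pvLe a b) (h2 : pvLe b c) : pvLe a c := by
  rcases h1 with h1 | ⟨h1, h1'⟩ <;> rcases h2 with h2 | ⟨h2, h2'⟩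
  · exact Or.inl (lt_trans h1 h2)
  · exact Or.inl (h2 ▸ h1)
  · exact Or.inl (h1 ▸ h2)
  · exact Or.inr ⟨h1.trans h2, le_trans h2' h1'⟩

theorem pvLe_antisymm {a b : Int × String} (h1 : pvLe a b) (h2 : pvLe b a) : a = b := by
  rcases h1 with h1 | ⟨h1, h1'⟩ <;> rcases h2 with h2 | ⟨h2, h2'⟩
  · exact absurd h2 (not_lt_of_gt h1)
  · omega
  · omega
  · exact Prod.ext h1 (le_antisymm h2' h1')

theorem pvLe_total (a b : Int × String) : pvLe a b ∨ pvLe b a := by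
  rcases lt_trichotomy a.1 b.1 with h | h | h
  · exact Or.inl (Or.inl h)
  · rcases le_total a.2 b.2 with h' | h'
    · exact Or.inr (Or.inr ⟨h.symm, h'⟩)
    · exact Or.inl (Or.inr ⟨h, h'⟩)
  · exact Or.inr (Or.inl h)

-- A's update condition fires exactly when the candidate is NOT at-most the current best
theorem pvCond_iff (p : Int) (t : String) (s : Int × String) :
    (p > s.1 ∨ (p = s.1 ∧ t < s.2)) ↔ ¬ pvLe (p, t) s := by
  unfold pvLe
  constructor
  · rintro (h | ⟨h, h'⟩) (g | ⟨g, g'⟩)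
    · exact lt_asymm h g
    · exact (ne_of_gt h) g
    · exact lt_irrefl _ (lt_of_lt_of_le g (le_of_eq h.symm))
    · exact absurd g' (not_le_of_gt h')
  · intro h
    rcases lt_trichotomy p s.1 with g | g | g
    · exact absurd (Or.inl g) h
    · rcases lt_or_ge t s.2 with g' | g'
      · exact Or.inr ⟨g, g'⟩
      · exact absurd (Or.inr ⟨g, g'⟩) h
    · exact Or.inl g

theorem pvProb_nonneg (name t : String) : 0 ≤ calculate_probability name t := by
  unfold calculate_probability
  rw [PySem.Int.mod_eq_emod_of_pos (by norm_num)]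
  exact Int.emod_nonneg _ (by norm_num)

-- characterisation of A's fold from an arbitrary start state
theorem pvFold_spec (name : String) (l : List String) (s : Int × String) :
    (l.foldl
      (fun best team =>
        let prob := calculate_probability name team
        if prob > best.1 ∨ (prob = best.1 ∧ team < best.2) then (prob, team) else best)
      s = s ∨
     l.foldl
      (fun best team =>
        let prob := calculate_probability name team
        if prob > best.1 ∨ (prob = best.1 ∧ team < best.2) then (prob, team) else best)
      s ∈ l.map (fun t => (calculate_probability name t, t))) ∧
    pvLe s (l.foldl
      (fun best team =>
        let prob := calculate_probability name team
        if prob > best.1 ∨ (prob = best.1 ∧ team < best.2) then (prob, team) else best)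
      s) ∧
    ∀ y ∈ l.map (fun t => (calculate_probability name t, t)),
      pvLe y (l.foldl
      (fun best team =>
        let prob := calculate_probability name team
        if prob > best.1 ∨ (prob = best.1 ∧ team < best.2) then (prob, team) else best)
      s) := by
  induction l generalizing s with
  | nil => exact ⟨Or.inl rfl, pvLe_refl s, by simp⟩
  | cons t ts ih =>
    rw [List.foldl_cons]
    simp only []
    by_cases hc : calculate_probability name t > s.1 ∨ (calculate_probability name t = s.1 ∧ t < s.2)
    · rw [if_pos hc]
      obtain ⟨ihmem, ihle, ihall⟩ := ih (calculate_probability name t, t)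
      have hsc : pvLe s (calculate_probability name t, t) := by
        rcases pvLe_total s (calculate_probability name t, t) with h | h
        · exact h
        · exact absurd h ((pvCond_iff _ _ _).mp hc)
      refine ⟨?_, pvLe_trans hsc ihle, ?_⟩
      · rcases ihmem with h | h
        · exact Or.inr (by rw [List.map_cons, h]; exact List.mem_cons_self ..)
        · exact Or.inr (by rw [List.map_cons]; exact List.mem_cons_of_mem _ h)
      · intro y hy
        rw [List.map_cons] at hy
        rcases List.mem_cons.mp hy with rfl | hy'
        · exact ihle
        · exact ihall y hy'
    · rw [if_neg hc]
      obtain ⟨ihmem, ihle, ihall⟩ := ih s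
      have hcs : pvLe (calculate_probability name t, t) s :=
        not_not.mp (fun hn => hc ((pvCond_iff _ _ _).mpr hn))
      refine ⟨?_, ihle, ?_⟩
      · rcases ihmem with h | h
        · exact Or.inl h
        · exact Or.inr (by rw [List.map_cons]; exact List.mem_cons_of_mem _ h)
      · intro y hy
        rw [List.map_cons] at hy
        rcases List.mem_cons.mp hy with rfl | hy'
        · exact pvLe_trans hcs ihle
        · exact ihall y hy'

theorem pvMain (name t0 : String) (ts : List String) :
    find_best_team_name name (t0 :: ts) = find_best_team_name_alt name (t0 :: ts) := by
  unfold find_best_team_name find_best_team_name_alt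
  simp only []
  obtain ⟨hmem, -, hall⟩ := pvFold_spec name (t0 :: ts) ((-1 : Int), "")
  set r := (t0 :: ts).foldl
      (fun best team =>
        let prob := calculate_probability name team
        if prob > best.1 ∨ (prob = best.1 ∧ team < best.2) then (prob, team) else best)
      ((-1 : Int), "") with hrdef
  set scored := (t0 :: ts).map (fun t => (calculate_probability name t, t)) with hscored
  have hhead : (calculate_probability name t0, t0) ∈ scored := by
    rw [hscored, List.map_cons]; exact List.mem_cons_self ..
  have hr : r ∈ scored := by
    rcases hmem with h | h
    · exfalso
      have := hall _ hhead
      rw [h] at this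
      rcases this with h' | ⟨h', -⟩
      · exact absurd (lt_of_le_of_lt (pvProb_nonneg name t0) h') (by norm_num)
      · have h0 := pvProb_nonneg name t0
        simp only [] at h'
        omega
    · exact h
  obtain ⟨M, hmax⟩ : ∃ M, PySem.List.max? (scored.map Prod.fst) (fun p => p) = some M := by
    cases h : PySem.List.max? (scored.map Prod.fst) (fun p => p) with
    | none =>
      exfalso
      have := (PySem.List.max?_eq_none_iff _ _).mp h
      rw [hscored, List.map_cons, List.map_cons] at this
      exact List.cons_ne_nil _ _ this
    | some M => exact ⟨M, rfl⟩
  have hMmem : M ∈ scored.map Prod.fst := PySem.List.max?_mem hmax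
  have hMmax : ∀ p ∈ scored.map Prod.fst, p ≤ M := by
    intro p hp; exact PySem.List.max?_isMax hmax p hp
  obtain ⟨pt, hpt, hpt1⟩ := List.mem_map.mp hMmem
  have hptfil : pt.2 ∈ (scored.filter (fun pt => pt.1 == M)).map Prod.snd :=
    List.mem_map.mpr ⟨pt, List.mem_filter.mpr ⟨hpt, by simp [hpt1]⟩, rfl⟩
  obtain ⟨T, hmin⟩ : ∃ T, PySem.List.min? ((scored.filter (fun pt => pt.1 == M)).map Prod.snd)
      (fun t => t) = some T := by
    cases h : PySem.List.min? ((scored.filter (fun pt => pt.1 == M)).map Prod.snd) (fun t => t) with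
    | none =>
      exfalso
      rw [(PySem.List.min?_eq_none_iff _ _).mp h] at hptfil
      exact List.not_mem_nil hptfil
    | some T => exact ⟨T, rfl⟩
  have hTmem : T ∈ (scored.filter (fun pt => pt.1 == M)).map Prod.snd := PySem.List.min?_mem hmin
  have hTmin : ∀ u ∈ (scored.filter (fun pt => pt.1 == M)).map Prod.snd, T ≤ u := by
    intro u hu; exact PySem.List.min?_isMin hmin u hu
  have hMT : (M, T) ∈ scored := by
    obtain ⟨qt, hqt, hqt2⟩ := List.mem_map.mp hTmem
    obtain ⟨hqmem, hq1⟩ := List.mem_filter.mp hqt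
    have : qt = (M, T) := by
      have h1 : qt.1 = M := by simpa using hq1
      rw [← h1, ← hqt2]
    exact this ▸ hqmem
  have hMTtop : ∀ y ∈ scored, pvLe y (M, T) := by
    intro y hy
    have hy1 : y.1 ≤ M := hMmax y.1 (List.mem_map.mpr ⟨y, hy, rfl⟩)
    rcases lt_or_eq_of_le hy1 with h | h
    · exact Or.inl h
    · refine Or.inr ⟨h, ?_⟩
      exact hTmin y.2 (List.mem_map.mpr ⟨y, List.mem_filter.mpr ⟨hy, by simp [h]⟩, rfl⟩)
  have : r = (M, T) := pvLe_antisymm (hMTtop r hr) (hall _ hMT)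
  rw [hmax, Option.getD_some, hmin, Option.getD_some, this]

-- ===== VERDICT (by name: the statement is the Claim_ definition above) =====
theorem find_best_team_name_spec : Claim_equal_find_best_team_name := by
  intro name team_names _
  unfold Spec_find_best_team_name
  cases team_names with
  | nil => rfl
  | cons t0 ts => exact pvMain name t0 ts
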